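-- pv_equiv track=rewrite | github.com/averyzgriffin/modularity | eom/broadness.py | get_goal
-- ===== SOURCE A (Python) =====
-- def get_goal(gen):
--     i = 0
--     while gen > 20:
--         gen -= 20
--         i += 1
--     if i % 2 == 0:
--         return True
--     return False
-- ===== SOURCE B (Python) =====
-- def get_goal(gen):
--     i = 0 if gen <= 20 else (gen - 1) // 20
--     return i % 2 == 0
-- ===== Notes on version B (the rewrite author's own statement) =====
-- stated objective: faster
-- what changed: Replaced the while loop that repeatedly subtracts 20 with a closed-form count of steps, (gen-1)//20 for gen>20, and tests its parity directly.
import Mathlib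
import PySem

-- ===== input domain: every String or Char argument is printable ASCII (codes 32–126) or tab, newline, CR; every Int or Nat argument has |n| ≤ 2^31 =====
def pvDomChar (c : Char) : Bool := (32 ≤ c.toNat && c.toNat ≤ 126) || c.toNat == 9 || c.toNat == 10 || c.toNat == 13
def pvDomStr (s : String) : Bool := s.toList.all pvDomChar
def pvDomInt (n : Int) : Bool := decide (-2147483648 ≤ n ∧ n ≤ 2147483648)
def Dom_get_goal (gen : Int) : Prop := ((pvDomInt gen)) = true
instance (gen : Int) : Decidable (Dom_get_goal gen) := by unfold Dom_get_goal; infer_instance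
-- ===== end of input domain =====

-- B replaces A's subtract-20 loop with a closed-form step count and is O(1) instead of O(gen).

-- ===== PORT A =====
-- the while loop: state (gen, i); terminates since gen strictly decreases while gen > 20
def get_goal_loop (gen i : Int) : Bool :=
  if h : gen > 20 then
    get_goal_loop (gen - 20) (i + 1)
  else
    if PySem.Int.mod i 2 = 0 then true else false
termination_by gen.toNat
decreasing_by omega

def get_goal (gen : Int) : Bool := get_goal_loop gen 0

-- ===== PORT B =====
def get_goal_alt (gen : Int) : Bool :=
  let i : Int := if gen ≤ 20 then 0 else PySem.Int.floordiv (gen - 1) 20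
  PySem.Int.mod i 2 == 0

-- ===== PRECONDITION & SPEC =====
def Spec_get_goal (gen : Int) (out : Bool) : Prop := out = get_goal_alt gen
instance (gen : Int) (out : Bool) : Decidable (Spec_get_goal gen out) := by unfold Spec_get_goal; infer_instance

-- ===== CLAIM (what is proved, stated in full; the proofs are below) =====
def Claim_equal_get_goal : Prop := ∀ (gen : Int), Dom_get_goal gen → Spec_get_goal gen (get_goal gen)

-- ===== LEMMAS AND PROOFS =====

-- the loop computes the parity of i plus the closed-form step count
theorem get_goal_loop_eq (gen i : Int) :
    get_goal_loop gen i =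
      ((i + (if gen ≤ 20 then 0 else (gen - 1) / 20)) % 2 == 0) := by
  induction gen, i using get_goal_loop.induct with
  | case1 gen i h ih =>
      rw [get_goal_loop, dif_pos h, ih]
      have : (if gen - 20 ≤ 20 then (0:Int) else (gen - 20 - 1) / 20)
           = (if gen ≤ 20 then 0 else (gen - 1) / 20) - 1 := by
        split_ifs with h1 h2
        · omega
        · -- 20 < gen ≤ 40 : (gen-1)/20 = 1
          omega
        · omega
        · omega
      rw [this]
      have : i + 1 + ((if gen ≤ 20 then (0:Int) else (gen - 1) / 20) - 1)
           = i + (if gen ≤ 20 then 0 else (gen - 1) / 20) := by ring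
      rw [this]
  | case2 gen i h hm =>
      rw [get_goal_loop, dif_neg h, if_pos hm, if_pos (by omega : gen ≤ 20)]
      have : PySem.Int.mod i 2 = i % 2 := PySem.Int.mod_eq_emod_of_pos (by norm_num)
      rw [this] at hm
      simp [hm]
  | case3 gen i h hm =>
      rw [get_goal_loop, dif_neg h, if_neg hm, if_pos (by omega : gen ≤ 20)]
      have : PySem.Int.mod i 2 = i % 2 := PySem.Int.mod_eq_emod_of_pos (by norm_num)
      rw [this] at hm
      simp [hm]

theorem get_goal_spec : Claim_equal_get_goal := by
  intro gen _
  unfold Spec_get_goal get_goal get_goal_alt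
  rw [get_goal_loop_eq]
  have hm : ∀ j : Int, PySem.Int.mod j 2 = j % 2 :=
    fun j => PySem.Int.mod_eq_emod_of_pos (by norm_num)
  split_ifs with h
  · simp
  · simp
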